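-- pv_equiv track=rewrite | github.com/unica-isde/isde | src2/state/naive_approach/sum_skip_01.py | sum_skip_el2
-- ===== SOURCE A (Python) =====
-- def _go_to_the_next(nums, el_to_skip, i):
--     len_nums = len(nums)
--     while nums[i] == el_to_skip:
--         i += 1
--         if i == len_nums:
--             break
--     return i
--
-- def sum_skip_el2(nums, el_to_skip):
--     sum_val = 0
--     i = 0
--     len_nums = len(nums)
--     while i < len_nums:
--         if nums[i] != el_to_skip:
--             sum_val += nums[i]
--             i += 1
--         else:
--             i = _go_to_the_next(nums, el_to_skip, i) + 1
--     return sum_val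
-- ===== SOURCE B (Python) =====
-- def sum_skip_el2(nums, el_to_skip):
--     total = 0
--     skip_next = False
--     for x in nums:
--         if x == el_to_skip:
--             skip_next = True
--         elif skip_next:
--             skip_next = False
--         else:
--             total += x
--     return total
-- ===== Notes on version B (the rewrite author's own statement) =====
-- stated objective: simpler
-- what changed: Replaced the index-based while loop with a nested ahead-scanning helper by a single for-loop over the elements carrying a boolean skip_next flag.
import Mathlib
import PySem

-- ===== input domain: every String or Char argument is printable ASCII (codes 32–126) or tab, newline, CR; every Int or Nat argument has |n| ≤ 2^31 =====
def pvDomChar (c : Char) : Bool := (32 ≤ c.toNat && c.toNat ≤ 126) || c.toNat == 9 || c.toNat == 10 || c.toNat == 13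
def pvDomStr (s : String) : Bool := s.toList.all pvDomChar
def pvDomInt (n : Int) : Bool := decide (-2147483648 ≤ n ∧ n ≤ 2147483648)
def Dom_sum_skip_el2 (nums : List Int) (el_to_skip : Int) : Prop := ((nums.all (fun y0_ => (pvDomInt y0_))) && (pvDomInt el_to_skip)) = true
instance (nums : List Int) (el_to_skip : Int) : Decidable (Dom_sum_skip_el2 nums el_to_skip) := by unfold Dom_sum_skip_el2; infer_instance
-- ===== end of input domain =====

-- B replaces A's index-based while loop with nested ahead-scanning helper by one fold carrying a skip_next flag (simpler).


-- ===== PORT A =====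
-- while nums[i] == el_to_skip: i += 1; if i == len_nums: break
def goToTheNext (nums : List Int) (el_to_skip : Int) (i : Nat) : Nat :=
  if h : i < nums.length then
    if nums[i]'h = el_to_skip then
      if i + 1 = nums.length then i + 1 else goToTheNext nums el_to_skip (i + 1)
    else i
  else i
termination_by nums.length - i
decreasing_by omega

theorem goToTheNext_ge (nums : List Int) (el : Int) (i : Nat) : i ≤ goToTheNext nums el i := by
  unfold goToTheNext
  split
  · split
    · split
      · omega
      · have := goToTheNext_ge nums el (i + 1); omega
    · omega
  · omega
termination_by nums.length - i
decreasing_by omega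

-- outer while loop of sum_skip_el2
def sumSkipLoop (nums : List Int) (el_to_skip : Int) (sum_val : Int) (i : Nat) : Int :=
  if h : i < nums.length then
    if nums[i]'h ≠ el_to_skip then
      sumSkipLoop nums el_to_skip (sum_val + nums[i]'h) (i + 1)
    else
      sumSkipLoop nums el_to_skip sum_val (goToTheNext nums el_to_skip i + 1)
  else sum_val
termination_by nums.length - i
decreasing_by
  · omega
  · have := goToTheNext_ge nums el_to_skip i; omega

def sum_skip_el2 (nums : List Int) (el_to_skip : Int) : Int :=
  sumSkipLoop nums el_to_skip 0 0

-- ===== PORT B =====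
def sum_skip_el2_alt (nums : List Int) (el_to_skip : Int) : Int :=
  (nums.foldl
    (fun st x =>
      if x = el_to_skip then (st.1, true)
      else if st.2 then (st.1, false)
      else (st.1 + x, false))
    (0, false)).1

-- ===== PRECONDITION & SPEC =====
def Spec_sum_skip_el2 (nums : List Int) (el_to_skip : Int) (out : Int) : Prop := out = sum_skip_el2_alt nums el_to_skip
instance (nums : List Int) (el_to_skip : Int) (out : Int) : Decidable (Spec_sum_skip_el2 nums el_to_skip out) := by unfold Spec_sum_skip_el2; infer_instance

-- ===== CLAIM (what is proved, stated in full; the proofs are below) =====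
def Claim_equal_sum_skip_el2 : Prop := ∀ (nums : List Int) (el_to_skip : Int), Dom_sum_skip_el2 nums el_to_skip → Spec_sum_skip_el2 nums el_to_skip (sum_skip_el2 nums el_to_skip)

-- ===== LEMMAS AND PROOFS =====

-- reference functions: F = value of the remaining list in "normal" state, G = in "just skipped" state
mutual
def refF (el : Int) : List Int → Int
  | [] => 0
  | x :: xs => if x = el then refG el xs else x + refF el xs
def refG (el : Int) : List Int → Int
  | [] => 0
  | x :: xs => if x = el then refG el xs else refF el xs
end

-- B's fold computes refF / refG depending on the flag
theorem foldB_spec (el : Int) (xs : List Int) : ∀ (s : Int) (b : Bool),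
    (xs.foldl
      (fun st x =>
        if x = el then (st.1, true)
        else if st.2 then (st.1, false)
        else (st.1 + x, false))
      (s, b)).1 = s + (if b then refG el xs else refF el xs) := by
  induction xs with
  | nil => intro s b; cases b <;> simp [refF, refG]
  | cons x xs ih =>
    intro s b
    cases b <;> by_cases hx : x = el <;>
      simp [List.foldl_cons, hx, ih, refF, refG] <;> ring

theorem goToTheNext_drop (nums : List Int) (el : Int) (i : Nat) :
    nums.drop (goToTheNext nums el i) = (nums.drop i).dropWhile (· == el) := by
  unfold goToTheNext
  split
  · rename_i hi
    have hdrop : nums.drop i = nums[i] :: nums.drop (i + 1) :=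
      List.drop_eq_getElem_cons hi
    split
    · rename_i heq
      rw [hdrop, List.dropWhile_cons]
      simp only [heq, beq_self_eq_true, if_true]
      split
      · rename_i hlen
        rw [List.drop_eq_nil_of_le (by omega)]
        simp
      · exact goToTheNext_drop nums el (i + 1)
    · rename_i hne
      rw [hdrop, List.dropWhile_cons]
      simp [hne]
  · rename_i hi
    rw [List.drop_eq_nil_of_le (by omega)]
    simp
termination_by nums.length - i
decreasing_by omega

theorem refG_eq_refF_tail_dropWhile (el : Int) (xs : List Int) :
    refG el xs = refF el ((xs.dropWhile (· == el)).tail) := by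
  induction xs with
  | nil => simp [refG, refF]
  | cons x xs ih =>
    by_cases hx : x = el <;> simp [refG, hx, ih]

theorem sumSkipLoop_spec (nums : List Int) (el : Int) (i : Nat) : ∀ (s : Int),
    sumSkipLoop nums el s i = s + refF el (nums.drop i) := by
  intro s
  unfold sumSkipLoop
  split
  · rename_i h
    have hdrop : nums.drop i = nums[i] :: nums.drop (i + 1) :=
      List.drop_eq_getElem_cons h
    split
    · rename_i hne
      rw [sumSkipLoop_spec nums el (i + 1), hdrop]
      simp only [refF]
      rw [if_neg hne]
      ring
    · rename_i heq
      have heq' : nums[i] = el := by by_contra hc; exact heq hc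
      have hge := goToTheNext_ge nums el i
      rw [sumSkipLoop_spec nums el (goToTheNext nums el i + 1)]
      have htail : nums.drop (goToTheNext nums el i + 1)
          = ((nums.drop i).dropWhile (· == el)).tail := by
        rw [List.drop_add_one_eq_tail_drop, goToTheNext_drop nums el i]
      rw [htail, hdrop, refF]
      simp only [heq', if_true]
      rw [refG_eq_refF_tail_dropWhile]
      simp
  · rename_i h
    have : nums.drop i = [] := List.drop_eq_nil_of_le (by omega)
    simp [this, refF]
termination_by nums.length - i
decreasing_by
  · omega
  · have := goToTheNext_ge nums el i; omega

-- ===== VERDICT (by name: the statement is the Claim_ definition above) =====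
theorem sum_skip_el2_spec : Claim_equal_sum_skip_el2 := by
  intro nums el _
  show sum_skip_el2 nums el = sum_skip_el2_alt nums el
  rw [sum_skip_el2, sumSkipLoop_spec, sum_skip_el2_alt, foldB_spec]
  simp
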